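-- pv_equiv track=rewrite | github.com/pypi-data/pypi-mirror-391 | packages/imgctl/imgctl-3.0.15-py3-none-any.whl/utils/formatters.py | parse_columns_spec
-- ===== SOURCE A (Python) =====
-- from typing import Any, Dict, List, Optional, Callable
--
-- def parse_columns_spec(
--         columns_spec: str, default_columns: List[str], all_columns: List[str]
-- ) -> List[str]:
--     """
--     Парсит спецификацию столбцов с поддержкой префиксов +/-
--
--     Args:
--         columns_spec: Спецификация столбцов (например: "NAME,STATUS" или "+REPLICAS,-NAMESPACE")
--         default_columns: Столбцы по умолчанию
--         all_columns: Все доступные столбцы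
--
--     Returns:
--         Список столбцов для отображения
--     """
--     if not columns_spec:
--         return default_columns
--
--     # Разделяем по запятым и убираем пробелы
--     parts = [part.strip() for part in columns_spec.split(",")]
--
--     # Проверяем, есть ли префиксы +/-
--     has_prefixes = any(part.startswith(("+", "-")) for part in parts)
--
--     if has_prefixes:
--         # Режим с префиксами: начинаем с столбцов по умолчанию
--         result_columns = default_columns.copy()
--
--         for part in parts:
--             if part.startswith("+"):
--                 # Добавляем столбец
--                 column = part[1:].upper()
--                 if column in all_columns and column not in result_columns:
--                     result_columns.append(column)
--             elif part.startswith("-"):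
--                 # Удаляем столбец
--                 column = part[1:].upper()
--                 if column in result_columns:
--                     result_columns.remove(column)
--             else:
--                 # Обычный столбец (без префикса) - заменяем весь список
--                 return [part.upper() for part in parts if part.upper() in all_columns]
--
--         return result_columns
--     else:
--         # Обычный режим: явное указание столбцов
--         return [part.upper() for part in parts if part.upper() in all_columns]
-- ===== SOURCE B (Python) =====
-- def parse_columns_spec(columns_spec, default_columns, all_columns):
--     if not columns_spec:
--         return default_columns
--     parts = [p.strip() for p in columns_spec.split(",")]
--     if all(p.startswith(("+", "-")) for p in parts):
--         result = default_columns.copy()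
--         for p in parts:
--             col = p[1:].upper()
--             if p.startswith("+"):
--                 if col in all_columns and col not in result:
--                     result.append(col)
--             elif col in result:
--                 result.remove(col)
--         return result
--     return [p.upper() for p in parts if p.upper() in all_columns]
-- ===== Notes on version B (the rewrite author's own statement) =====
-- stated objective: simpler
-- what changed: B decides the mode once with an all()-prefixed precheck and then runs a single plain loop, instead of A's any()-check plus a loop that can bail out mid-way into the plain-column mode.
import Mathlib
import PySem

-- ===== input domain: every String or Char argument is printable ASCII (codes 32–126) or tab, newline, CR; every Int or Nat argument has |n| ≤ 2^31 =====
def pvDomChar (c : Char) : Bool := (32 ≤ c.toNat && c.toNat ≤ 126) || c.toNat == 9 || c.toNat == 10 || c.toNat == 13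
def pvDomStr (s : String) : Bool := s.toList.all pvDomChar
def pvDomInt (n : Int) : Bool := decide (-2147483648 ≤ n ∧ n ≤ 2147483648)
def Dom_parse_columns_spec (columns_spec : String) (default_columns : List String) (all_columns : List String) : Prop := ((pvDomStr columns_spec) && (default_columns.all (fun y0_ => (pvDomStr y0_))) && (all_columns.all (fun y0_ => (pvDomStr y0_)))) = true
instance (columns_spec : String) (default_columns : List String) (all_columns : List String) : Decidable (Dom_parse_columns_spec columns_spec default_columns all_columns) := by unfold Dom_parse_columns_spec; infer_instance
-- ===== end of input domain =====

-- B decides the mode once (are ALL parts prefixed?) and then runs one plain loop, instead of A's any()-check plus a loop that can bail out mid-way; simpler decomposition, same results.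

-- ===== PORT A =====
-- the plain-mode comprehension [part.upper() for part in parts if part.upper() in all_columns]
def pvPlainA (parts all_columns : List String) : List String :=
  parts.filterMap (fun part =>
    if all_columns.contains (PySem.Str.upper part) then some (PySem.Str.upper part) else none)

-- A's for-loop over parts carrying result_columns; the else-branch early-returns the plain list over the FULL parts
def pvLoopA (parts all_columns : List String) : List String → List String → List String
  | [], result_columns => result_columns
  | part :: rest, result_columns =>
    if PySem.Str.startswith part "+" then
      let column := PySem.Str.upper (PySem.Str.slice part (some 1) none)    -- part[1:].upper()
      if all_columns.contains column && !(result_columns.contains column) then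
        pvLoopA parts all_columns rest (result_columns ++ [column])
      else
        pvLoopA parts all_columns rest result_columns
    else if PySem.Str.startswith part "-" then
      let column := PySem.Str.upper (PySem.Str.slice part (some 1) none)
      if result_columns.contains column then
        pvLoopA parts all_columns rest (result_columns.erase column)    -- list.remove of a present element = erase first occurrence
      else
        pvLoopA parts all_columns rest result_columns
    else
      pvPlainA parts all_columns

def parse_columns_spec (columns_spec : String) (default_columns : List String) (all_columns : List String) : List String :=
  if columns_spec = "" then default_columns
  else
    -- columns_spec.split(","): the separator "," is nonempty so Str.split? is always `some`
    let parts := ((PySem.Str.split? columns_spec ",").getD []).map PySem.Str.strip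
    let has_prefixes := parts.any (fun part => PySem.Str.startswith part "+" || PySem.Str.startswith part "-")
    if has_prefixes then
      pvLoopA parts all_columns parts default_columns
    else
      pvPlainA parts all_columns

-- ===== PORT B =====
-- B's loop body applying one prefixed part to the accumulated column list
def pvStepB (all_columns : List String) (result : List String) (p : String) : List String :=
  let col := PySem.Str.upper (PySem.Str.slice p (some 1) none)
  if PySem.Str.startswith p "+" then
    if all_columns.contains col && !(result.contains col) then result ++ [col] else result
  else if result.contains col then result.erase col else result

def parse_columns_spec_alt (columns_spec : String) (default_columns : List String) (all_columns : List String) : List String :=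
  if columns_spec = "" then default_columns
  else
    let parts := ((PySem.Str.split? columns_spec ",").getD []).map PySem.Str.strip
    if parts.all (fun p => PySem.Str.startswith p "+" || PySem.Str.startswith p "-") then
      parts.foldl (pvStepB all_columns) default_columns
    else
      parts.filterMap (fun p =>
        if all_columns.contains (PySem.Str.upper p) then some (PySem.Str.upper p) else none)

-- ===== PRECONDITION & SPEC =====
def Spec_parse_columns_spec (columns_spec : String) (default_columns : List String) (all_columns : List String) (out : List String) : Prop := out = parse_columns_spec_alt columns_spec default_columns all_columns
instance (columns_spec : String) (default_columns : List String) (all_columns : List String) (out : List String) : Decidable (Spec_parse_columns_spec columns_spec default_columns all_columns out) := by unfold Spec_parse_columns_spec; infer_instance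

-- ===== CLAIM (what is proved, stated in full; the proofs are below) =====
def Claim_equal_parse_columns_spec : Prop := ∀ (columns_spec : String) (default_columns : List String) (all_columns : List String), Dom_parse_columns_spec columns_spec default_columns all_columns → Spec_parse_columns_spec columns_spec default_columns all_columns (parse_columns_spec columns_spec default_columns all_columns)

-- ===== LEMMAS AND PROOFS =====

-- when every remaining part is prefixed, A's loop is B's foldl
theorem pvLoopA_all_prefixed (parts all_columns : List String) :
    ∀ (rest : List String) (result : List String),
    (∀ p ∈ rest, (PySem.Str.startswith p "+" || PySem.Str.startswith p "-") = true) →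
    pvLoopA parts all_columns rest result = rest.foldl (pvStepB all_columns) result := by
  intro rest
  induction rest with
  | nil => intro result _; simp [pvLoopA]
  | cons p rest ih =>
    intro result h
    have hp := h p (List.mem_cons_self)
    have hrest : ∀ q ∈ rest, (PySem.Str.startswith q "+" || PySem.Str.startswith q "-") = true :=
      fun q hq => h q (List.mem_cons_of_mem _ hq)
    by_cases hplus : PySem.Str.startswith p "+" = true
    · simp only [pvLoopA, hplus, if_true, List.foldl_cons, pvStepB]
      split_ifs with hc <;> exact ih _ hrest
    · have hminus : PySem.Str.startswith p "-" = true := by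
        rw [Bool.or_eq_true] at hp
        rcases hp with h' | h'
        · exact absurd h' hplus
        · exact h'
      have hplus' : PySem.Str.startswith p "+" = false := Bool.not_eq_true _ |>.mp hplus
      simp only [pvLoopA, hplus', hminus, if_true, Bool.false_eq_true, if_false, List.foldl_cons, pvStepB]
      split_ifs with hc <;> exact ih _ hrest

-- when some remaining part is unprefixed, A's loop ends in the plain comprehension
theorem pvLoopA_bail (parts all_columns : List String) :
    ∀ (rest : List String) (result : List String),
    (∃ p ∈ rest, (PySem.Str.startswith p "+" || PySem.Str.startswith p "-") = false) →
    pvLoopA parts all_columns rest result = pvPlainA parts all_columns := by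
  intro rest
  induction rest with
  | nil => rintro result ⟨p, hp, _⟩; exact absurd hp (List.not_mem_nil)
  | cons p rest ih =>
    rintro result ⟨q, hq, hbad⟩
    obtain ⟨hb1, hb2⟩ := Bool.or_eq_false_iff.mp hbad
    by_cases hplus : PySem.Str.startswith p "+" = true
    · have hq' : q ∈ rest := by
        rcases List.mem_cons.mp hq with rfl | h
        · rw [hb1] at hplus; exact absurd hplus (by simp)
        · exact h
      simp only [pvLoopA, hplus, if_true]
      split_ifs <;> exact ih _ ⟨q, hq', hbad⟩
    · by_cases hminus : PySem.Str.startswith p "-" = true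
      · have hq' : q ∈ rest := by
          rcases List.mem_cons.mp hq with rfl | h
          · rw [hb2] at hminus; exact absurd hminus (by simp)
          · exact h
        have hplus' : PySem.Str.startswith p "+" = false := Bool.not_eq_true _ |>.mp hplus
        simp only [pvLoopA, hplus', hminus, if_true, Bool.false_eq_true, if_false]
        split_ifs <;> exact ih _ ⟨q, hq', hbad⟩
      · have hplus' : PySem.Str.startswith p "+" = false := Bool.not_eq_true _ |>.mp hplus
        have hminus' : PySem.Str.startswith p "-" = false := Bool.not_eq_true _ |>.mp hminus
        simp only [pvLoopA, hplus', hminus', Bool.false_eq_true, if_false]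

-- splitOn.go always produces at least one piece
theorem pv_go_ne_nil (sep : List Char) : ∀ (fuel : Nat) (l cur : List Char) (acc : List (List Char)),
    PySem.Chars.splitOn.go sep fuel l cur acc ≠ [] := by
  intro fuel
  induction fuel with
  | zero => intro l cur acc; simp [PySem.Chars.splitOn.go]
  | succ n ih =>
    intro l cur acc
    match l with
    | [] => simp [PySem.Chars.splitOn.go]
    | c :: rest =>
      simp only [PySem.Chars.splitOn.go]
      split_ifs <;> apply ih

-- hence the stripped parts list is never empty
theorem pv_parts_ne_nil (s : String) :
    ((PySem.Str.split? s ",").getD []).map PySem.Str.strip ≠ [] := by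
  have h := pv_go_ne_nil [','] (s.toList.length + 1) s.toList [] []
  simp [PySem.Str.split?, PySem.Chars.split?, PySem.Chars.splitOn]
  exact h

-- ===== VERDICT (by name: the statement is the Claim_ definition above) =====
theorem parse_columns_spec_spec : Claim_equal_parse_columns_spec := by
  intro columns_spec default_columns all_columns _
  unfold Spec_parse_columns_spec parse_columns_spec parse_columns_spec_alt
  by_cases hempty : columns_spec = ""
  · simp [hempty]
  · simp only [hempty, if_false]
    set parts := ((PySem.Str.split? columns_spec ",").getD []).map PySem.Str.strip with hparts
    by_cases hall : ∀ p ∈ parts, (PySem.Str.startswith p "+" || PySem.Str.startswith p "-") = true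
    · have hne : parts ≠ [] := hparts ▸ pv_parts_ne_nil columns_spec
      have hany : parts.any (fun part => PySem.Str.startswith part "+" || PySem.Str.startswith part "-") = true := by
        rcases List.exists_mem_of_ne_nil parts hne with ⟨p, hp⟩
        exact List.any_eq_true.mpr ⟨p, hp, hall p hp⟩
      have hall' : parts.all (fun p => PySem.Str.startswith p "+" || PySem.Str.startswith p "-") = true :=
        List.all_eq_true.mpr hall
      simp only [hany, hall', if_true]
      exact pvLoopA_all_prefixed parts all_columns parts default_columns hall
    · push Not at hall
      rcases hall with ⟨q, hq, hbad⟩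
      have hbad' : (PySem.Str.startswith q "+" || PySem.Str.startswith q "-") = false := by
        simpa using hbad
      have hall' : parts.all (fun p => PySem.Str.startswith p "+" || PySem.Str.startswith p "-") = false := by
        by_contra h
        have hT : parts.all (fun p => PySem.Str.startswith p "+" || PySem.Str.startswith p "-") = true := by
          revert h
          cases parts.all (fun p => PySem.Str.startswith p "+" || PySem.Str.startswith p "-") <;> simp
        have := List.all_eq_true.mp hT q hq
        rw [this] at hbad'
        exact absurd hbad' (by simp)
      simp only [hall', Bool.false_eq_true, if_false]
      by_cases hany : parts.any (fun part => PySem.Str.startswith part "+" || PySem.Str.startswith part "-") = true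
      · simp only [hany, if_true]
        exact pvLoopA_bail parts all_columns parts default_columns ⟨q, hq, hbad'⟩
      · have hany' : parts.any (fun part => PySem.Str.startswith part "+" || PySem.Str.startswith part "-") = false :=
          Bool.not_eq_true _ |>.mp hany
        simp only [hany', Bool.false_eq_true, if_false, pvPlainA]
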